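-- pv_equiv track=rewrite | github.com/TDPessoa/cs50p | problem_set_5/test_plates/plates.py | lasts_are_number_checker
-- ===== SOURCE A (Python) =====
-- LETTERS = ('A', 'B', 'C', 'D', 'E', 'F', 'G', 'H', 'I', 'J', 'K', 'L', 'M', 'N', 'O', 'P', 'Q',
--            'R', 'S', 'T', 'U', 'V', 'W', 'X', 'Y', 'Z')
--
-- NUMBERS = ('0', '1', '2', '3', '4', '5', '6', '7', '8', '9')
--
-- def lasts_are_number_checker(plate):
--     for c in range(len(plate)):
--         if plate[c] in LETTERS:
--             for i in range(c):
--                 if plate[i] in NUMBERS: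
--                     return False
--
--                 else:
--                     pass
--
--         else:
--             pass
--     return True
-- ===== SOURCE B (Python) =====
-- LETTERS = ('A', 'B', 'C', 'D', 'E', 'F', 'G', 'H', 'I', 'J', 'K', 'L', 'M', 'N', 'O', 'P', 'Q',
--            'R', 'S', 'T', 'U', 'V', 'W', 'X', 'Y', 'Z')
--
-- NUMBERS = ('0', '1', '2', '3', '4', '5', '6', '7', '8', '9')
--
-- def lasts_are_number_checker(plate):
--     d = None
--     for i in range(len(plate)):
--         if plate[i] in NUMBERS:
--             d = i
--             break
--     if d is None:
--         return True
--     for ch in plate[d + 1:]: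
--         if ch in LETTERS:
--             return False
--     return True
-- ===== Notes on version B (the rewrite author's own statement) =====
-- stated objective: faster
-- what changed: B anchors on the first digit (one forward scan to find it, then one scan of the suffix for a letter), replacing A's per-letter rescan of the whole prefix.
import Mathlib
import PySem

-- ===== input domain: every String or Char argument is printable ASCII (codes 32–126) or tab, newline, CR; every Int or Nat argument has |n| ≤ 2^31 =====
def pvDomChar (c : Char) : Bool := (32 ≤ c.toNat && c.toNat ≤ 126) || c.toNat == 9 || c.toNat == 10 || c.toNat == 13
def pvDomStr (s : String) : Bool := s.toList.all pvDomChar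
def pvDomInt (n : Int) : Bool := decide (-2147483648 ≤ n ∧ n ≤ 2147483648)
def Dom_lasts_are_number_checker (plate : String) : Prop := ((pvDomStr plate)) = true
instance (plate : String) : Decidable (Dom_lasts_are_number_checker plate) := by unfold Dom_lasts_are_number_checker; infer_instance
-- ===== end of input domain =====

-- B replaces A's per-letter backward scan by one forward scan anchored on the first digit (simpler, single pass).

-- ===== PORT A =====
-- the LETTERS / NUMBERS tuples, as lists of Char; membership = tuple membership test
def pvLETTERS : List Char :=
  ['A','B','C','D','E','F','G','H','I','J','K','L','M','N','O','P','Q',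
   'R','S','T','U','V','W','X','Y','Z']
def pvNUMBERS : List Char := ['0','1','2','3','4','5','6','7','8','9']
def pvIsLetter (ch : Char) : Bool := pvLETTERS.contains ch
def pvIsDigit (ch : Char) : Bool := pvNUMBERS.contains ch

-- A's outer loop over indices c, carried as (prefix plate[0:c], suffix plate[c:]); the inner
-- 'for i in range(c): if plate[i] in NUMBERS: return False' is the left-to-right early-exit
-- scan pre.any pvIsDigit of that prefix.
def pvLoopA (pre : List Char) : List Char → Bool
  | [] => true
  | ch :: rest =>
    if pvIsLetter ch then
      if pre.any pvIsDigit then false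
      else pvLoopA (pre ++ [ch]) rest
    else pvLoopA (pre ++ [ch]) rest

def lasts_are_number_checker (plate : String) : Bool := pvLoopA [] plate.toList

-- ===== PORT B =====
-- first loop of Source B: index of the first digit (None → none); breaks at the first hit
def pvFindDigitIdx : List Char → Option Nat
  | [] => none
  | ch :: rest => if pvIsDigit ch then some 0 else (pvFindDigitIdx rest).map (· + 1)

-- second loop of Source B over the slice plate[d+1:]: early return False on a letter
def pvAltList (chars : List Char) : Bool :=
  match pvFindDigitIdx chars with
  | none => true
  | some d => !((chars.drop (d + 1)).any pvIsLetter)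

def lasts_are_number_checker_alt (plate : String) : Bool := pvAltList plate.toList

-- ===== PRECONDITION & SPEC =====
def Spec_lasts_are_number_checker (plate : String) (out : Bool) : Prop := out = lasts_are_number_checker_alt plate
instance (plate : String) (out : Bool) : Decidable (Spec_lasts_are_number_checker plate out) := by unfold Spec_lasts_are_number_checker; infer_instance

-- ===== CLAIM (what is proved, stated in full; the proofs are below) =====
def Claim_equal_lasts_are_number_checker : Prop := ∀ (plate : String), Dom_lasts_are_number_checker plate → Spec_lasts_are_number_checker plate (lasts_are_number_checker plate)

-- ===== LEMMAS AND PROOFS =====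

-- A's loop depends on the prefix only through 'does it contain a digit'
def pvAuxA (b : Bool) : List Char → Bool
  | [] => true
  | ch :: rest =>
    if pvIsLetter ch then
      if b then false else pvAuxA (b || pvIsDigit ch) rest
    else pvAuxA (b || pvIsDigit ch) rest

theorem pvLoopA_eq_aux (rest : List Char) : ∀ pre : List Char,
    pvLoopA pre rest = pvAuxA (pre.any pvIsDigit) rest := by
  induction rest with
  | nil => intro pre; rfl
  | cons ch rest ih =>
    intro pre
    simp only [pvLoopA, pvAuxA, ih, List.any_append, List.any_cons, List.any_nil, Bool.or_false]

theorem pvAuxA_true (rest : List Char) : pvAuxA true rest = !(rest.any pvIsLetter) := by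
  induction rest with
  | nil => rfl
  | cons ch rest ih =>
    simp only [pvAuxA, Bool.true_or, ih, List.any_cons, Bool.not_or]
    by_cases h : pvIsLetter ch = true <;> simp [h]

theorem pvAltList_eq_aux (chars : List Char) : pvAltList chars = pvAuxA false chars := by
  induction chars with
  | nil => rfl
  | cons ch rest ih =>
    by_cases hd : pvIsDigit ch = true
    · have hl : pvIsLetter ch = false := by
        simp only [pvIsDigit, pvNUMBERS, List.contains_cons, List.contains_nil,
          Bool.or_eq_true, beq_iff_eq, Bool.false_eq_true, or_false] at hd
        rcases hd with h|h|h|h|h|h|h|h|h|h <;> rw [h] <;> rfl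
      simp [pvAltList, pvFindDigitIdx, pvAuxA, hd, hl, pvAuxA_true]
    · have hd' : pvIsDigit ch = false := by simpa using hd
      simp only [pvAuxA, hd', Bool.or_false, ← ih]
      simp only [pvAltList, pvFindDigitIdx, hd']
      cases h : pvFindDigitIdx rest with
      | none => simp
      | some d => simp [List.drop_succ_cons]

-- ===== VERDICT (by name: the statement is the Claim_ definition above) =====
theorem lasts_are_number_checker_spec : Claim_equal_lasts_are_number_checker := by
  intro plate _
  unfold Spec_lasts_are_number_checker lasts_are_number_checker lasts_are_number_checker_alt
  rw [pvLoopA_eq_aux, pvAltList_eq_aux]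
  rfl
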